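-- pv_equiv track=rewrite | github.com/smejkyz/2023_aoc | day_12.py | has_correct_properties
-- ===== SOURCE A (Python) =====
-- def has_correct_properties(new_string, numbers):
--     _tmp = ''.join(new_string)
--     _tmp_splitted = [ val for val in _tmp.split('.') if len(val) > 0]
--     if len(_tmp_splitted) != len(numbers):
--         return False
--     for one, two in zip(_tmp_splitted, numbers, strict=True):
--         if len(one) != two:
--             return False
--     return True
-- ===== SOURCE B (Python) =====
-- def has_correct_properties(new_string, numbers):
--     it = iter(numbers)
--     run = 0
--     for ch in ''.join(new_string):
--         if ch == '.':
--             if run: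
--                 if next(it, None) != run:
--                     return False
--                 run = 0
--         else:
--             run += 1
--     if run and next(it, None) != run:
--         return False
--     return next(it, None) is None
-- ===== Notes on version B (the rewrite author's own statement) =====
-- stated objective: alternative
-- what changed: Replaces join+split('.')+filter+zip over materialised pieces by a single character scan that maintains a current run length and consumes the expected counts from an iterator.
import Mathlib
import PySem

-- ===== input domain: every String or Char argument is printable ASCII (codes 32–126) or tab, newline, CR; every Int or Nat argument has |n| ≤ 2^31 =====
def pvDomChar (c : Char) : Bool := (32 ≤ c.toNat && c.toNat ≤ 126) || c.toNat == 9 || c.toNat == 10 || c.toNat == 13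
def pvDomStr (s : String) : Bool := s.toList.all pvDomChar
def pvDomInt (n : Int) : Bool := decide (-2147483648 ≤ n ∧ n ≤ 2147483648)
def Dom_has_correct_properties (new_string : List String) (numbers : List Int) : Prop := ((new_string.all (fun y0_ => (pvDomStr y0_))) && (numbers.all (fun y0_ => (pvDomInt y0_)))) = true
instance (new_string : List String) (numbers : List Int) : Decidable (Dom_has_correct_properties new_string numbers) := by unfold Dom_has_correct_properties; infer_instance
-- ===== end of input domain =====

-- B replaces join + split('.') + filter + zip over materialised pieces by a single character scan with a run counter that consumes the expected counts one by one; same results, no intermediate lists.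


-- ===== PORT A =====
-- the `for one, two in zip(_tmp_splitted, numbers, strict=True)` loop with its early return
-- (lengths are equal when it runs, so strict zip = zip)
def hcpLoop : List (List Char × Int) → Bool
  | [] => true
  | (one, two) :: rest => if (PySem.Chars.len one : Int) ≠ two then false else hcpLoop rest

def has_correct_properties (new_string : List String) (numbers : List Int) : Bool :=
  let _tmp := PySem.Str.join "" new_string
  let _tmp_splitted := (PySem.Chars.splitOn _tmp.toList ['.']).filter (fun v => decide (0 < PySem.Chars.len v))
  if _tmp_splitted.length ≠ numbers.length then false
  else hcpLoop (_tmp_splitted.zip numbers)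

-- ===== PORT B =====
-- the scan loop of Source B: state = (current run length, numbers not yet consumed by the iterator);
-- `next(it, None) != run` with the None case folded into the match
def hcpScan : List Char → Nat → List Int → Bool
  | [], run, ns =>
    if run ≠ 0 then
      match ns with
      | [] => false
      | n :: rest => if n ≠ (run : Int) then false else rest.isEmpty
    else ns.isEmpty
  | c :: cs, run, ns =>
    if c = '.' then
      if run ≠ 0 then
        match ns with
        | [] => false
        | n :: rest => if n ≠ (run : Int) then false else hcpScan cs 0 rest
      else hcpScan cs 0 ns
    else hcpScan cs (run + 1) ns

def has_correct_properties_alt (new_string : List String) (numbers : List Int) : Bool :=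
  hcpScan (PySem.Str.join "" new_string).toList 0 numbers

-- ===== PRECONDITION & SPEC =====
def Spec_has_correct_properties (new_string : List String) (numbers : List Int) (out : Bool) : Prop := out = has_correct_properties_alt new_string numbers
instance (new_string : List String) (numbers : List Int) (out : Bool) : Decidable (Spec_has_correct_properties new_string numbers out) := by unfold Spec_has_correct_properties; infer_instance

-- ===== CLAIM (what is proved, stated in full; the proofs are below) =====
def Claim_equal_has_correct_properties : Prop := ∀ (new_string : List String) (numbers : List Int), Dom_has_correct_properties new_string numbers → Spec_has_correct_properties new_string numbers (has_correct_properties new_string numbers)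

-- ===== LEMMAS AND PROOFS =====
-- pvRuns cs run: the lengths of the maximal '.'-free blocks of cs, with a pending block of length run;
-- pvSplit cs cur: accumulator form of splitting on '.' (cur = current piece, reversed)
def pvRuns : List Char → Nat → List Nat
  | [], run => if run = 0 then [] else [run]
  | c :: cs, run => if c = '.' then (if run = 0 then pvRuns cs 0 else run :: pvRuns cs 0) else pvRuns cs (run + 1)

def pvSplit : List Char → List Char → List (List Char)
  | [], cur => [cur.reverse]
  | c :: rest, cur => if c = '.' then cur.reverse :: pvSplit rest [] else pvSplit rest (c :: cur)

theorem splitOn_go_eq (fuel : Nat) : ∀ (l cur : List Char) (acc : List (List Char)), l.length ≤ fuel →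
    PySem.Chars.splitOn.go ['.'] fuel l cur acc = acc.reverse ++ pvSplit l cur := by
  induction fuel with
  | zero =>
    intro l cur acc h
    have : l = [] := List.eq_nil_of_length_eq_zero (Nat.le_zero.mp h)
    subst this
    rw [PySem.Chars.splitOn.go.eq_def]
    simp [pvSplit]
  | succ fuel ih =>
    intro l cur acc h
    cases l with
    | nil =>
      rw [PySem.Chars.splitOn.go.eq_def]
      simp [pvSplit]
    | cons c rest =>
      rw [PySem.Chars.splitOn.go.eq_def]
      by_cases hc : c = '.'
      · subst hc
        simp only [List.isPrefixOf, BEq.rfl, Bool.true_and, List.isPrefixOf_nil_left, if_true,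
          List.length_cons, List.drop_succ_cons, List.length_nil, List.drop_zero]
        rw [ih rest [] _ (by simpa using Nat.le_of_succ_le_succ h)]
        simp [pvSplit]
      · have hp : List.isPrefixOf ['.'] (c :: rest) = false := by
          simp [List.isPrefixOf]
          exact fun h' => (hc h'.symm).elim
        simp only [hp, Bool.false_eq_true, if_false]
        rw [ih rest (c :: cur) acc (by simpa using Nat.le_of_succ_le_succ h)]
        simp [pvSplit, hc]

theorem splitOn_eq (l : List Char) :
    PySem.Chars.splitOn l ['.'] = pvSplit l [] := by
  rw [PySem.Chars.splitOn, splitOn_go_eq (l.length + 1) l [] [] (by omega)]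
  simp

theorem filter_pvSplit (cs : List Char) : ∀ cur : List Char,
    ((pvSplit cs cur).filter (fun v => decide (0 < PySem.Chars.len v))).map List.length
      = pvRuns cs cur.length := by
  induction cs with
  | nil =>
    intro cur
    by_cases h : cur = []
    · subst h; simp [pvSplit, pvRuns, PySem.Chars.len]
    · simp [pvSplit, pvRuns, PySem.Chars.len, List.length_pos_iff.mpr h,
        List.length_eq_zero_iff, h]
  | cons c rest ih =>
    have ih' : ∀ cur : List Char,
        ((pvSplit rest cur).filter (fun v => decide (0 < v.length))).map List.length
          = pvRuns rest cur.length := by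
      intro cur; have h0 := ih cur; simpa [PySem.Chars.len] using h0
    intro cur
    by_cases hc : c = '.'
    · subst hc
      by_cases h : cur = []
      · subst h; simp [pvSplit, pvRuns, PySem.Chars.len, ih']
      · simp [pvSplit, pvRuns, PySem.Chars.len, List.length_pos_iff.mpr h,
          List.length_eq_zero_iff, h, ih']
    · simp only [pvSplit, pvRuns, if_neg hc]
      have h0 := ih' (c :: cur)
      simpa [PySem.Chars.len] using h0

theorem hcpLoop_iff : ∀ (xs : List (List Char)) (ns : List Int), xs.length = ns.length →
    (hcpLoop (xs.zip ns) = true ↔ xs.map (fun p => ((p.length : Nat) : Int)) = ns) := by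
  intro xs
  induction xs with
  | nil => intro ns h; cases ns with
    | nil => simp [hcpLoop]
    | cons n rest => simp at h
  | cons x xs ih =>
    intro ns h
    cases ns with
    | nil => simp at h
    | cons n rest =>
      simp only [List.zip_cons_cons, hcpLoop, List.map_cons]
      by_cases hx : (PySem.Chars.len x : Int) = n
      · rw [if_neg (by simpa using hx)]
        rw [ih rest (by simpa using h)]
        simp [PySem.Chars.len] at hx
        simp [hx]
      · rw [if_pos (by simpa using hx)]
        simp only [Bool.false_eq_true, false_iff]
        intro h'
        injection h' with h1 h2
        exact hx (by simpa [PySem.Chars.len] using h1)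

theorem hcpScan_iff (cs : List Char) : ∀ (run : Nat) (ns : List Int),
    (hcpScan cs run ns = true ↔ ns = (pvRuns cs run).map (fun k => ((k : Nat) : Int))) := by
  induction cs with
  | nil =>
    intro run ns
    by_cases hr : run = 0
    · subst hr
      cases ns <;> simp [hcpScan, pvRuns]
    · cases ns with
      | nil => simp [hcpScan, pvRuns, hr]
      | cons n rest =>
        by_cases hn : n = (run : Int)
        · subst hn
          cases rest <;> simp [hcpScan, pvRuns, hr]
        · simp [hcpScan, pvRuns, hr, hn]
  | cons c cs ih =>
    intro run ns
    by_cases hc : c = '.'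
    · subst hc
      by_cases hr : run = 0
      · subst hr
        simp [hcpScan, pvRuns, ih]
      · cases ns with
        | nil => simp [hcpScan, pvRuns, hr]
        | cons n rest =>
          by_cases hn : n = (run : Int)
          · subst hn
            simp [hcpScan, pvRuns, hr, ih]
          · simp [hcpScan, pvRuns, hr, hn]
    · simp [hcpScan, pvRuns, hc, ih]

-- ===== VERDICT (by name: the statement is the Claim_ definition above) =====
theorem has_correct_properties_spec : Claim_equal_has_correct_properties := by
  unfold Claim_equal_has_correct_properties
  intro new_string numbers _
  unfold Spec_has_correct_properties has_correct_properties has_correct_properties_alt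
  simp only [splitOn_eq]
  set tmp := (PySem.Str.join "" new_string).toList with htmp
  set parts := (pvSplit tmp []).filter (fun v => decide (0 < PySem.Chars.len v)) with hparts
  have hfp : parts.map List.length = pvRuns tmp 0 := by
    rw [hparts, filter_pvSplit tmp []]
    rfl
  rw [Bool.eq_iff_iff]
  constructor
  · intro h
    by_cases hl : parts.length ≠ numbers.length
    · rw [if_pos hl] at h
      exact absurd h (by simp)
    · push_neg at hl
      rw [if_neg (by simpa using hl)] at h
      rw [hcpScan_iff]
      rw [hcpLoop_iff parts numbers hl] at h
      rw [← hfp, ← h]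
      simp
  · intro h
    rw [hcpScan_iff] at h
    have hmap : parts.map (fun p => ((p.length : Nat) : Int)) = numbers := by
      rw [h, ← hfp]; simp
    have hl : parts.length = numbers.length := by
      rw [← hmap]; simp
    rw [if_neg (by simpa using hl)]
    exact (hcpLoop_iff parts numbers hl).mpr hmap
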